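-- pv_equiv track=rewrite | github.com/EphremTil17/berana | modules/cli/layout_infer_runtime.py | build_target_pages
-- ===== SOURCE A (Python) =====
-- def build_target_pages(
--     total_pages: int,
--     start_page: int,
--     end_page: int | None,
--     omit_pages: set[int],
-- ) -> list[int]:
--     """Build the exact list of page numbers to process."""
--     upper_bound = min(total_pages, end_page) if end_page is not None else total_pages
--     if upper_bound < start_page:
--         return []
--     return [page for page in range(start_page, upper_bound + 1) if page not in omit_pages]
-- ===== SOURCE B (Python) =====
-- def build_target_pages(
--     total_pages: int,
--     start_page: int,
--     end_page: int | None,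
--     omit_pages: set[int],
-- ) -> list[int]:
--     """Build the exact list of page numbers to process."""
--     upper_bound = total_pages if end_page is None else min(total_pages, end_page)
--     pages = []
--     lo = start_page
--     for cut in sorted(p for p in omit_pages if start_page <= p <= upper_bound):
--         pages.extend(range(lo, cut))
--         lo = cut + 1
--     pages.extend(range(lo, upper_bound + 1))
--     return pages
-- ===== Notes on version B (the rewrite author's own statement) =====
-- stated objective: alternative
-- what changed: Instead of testing every page of the range against the omit set, B sorts the in-range omitted pages and emits the contiguous range segments between consecutive cuts, so the per-page membership test disappears; the early-return guard is dropped (all segments are empty then).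
import Mathlib
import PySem

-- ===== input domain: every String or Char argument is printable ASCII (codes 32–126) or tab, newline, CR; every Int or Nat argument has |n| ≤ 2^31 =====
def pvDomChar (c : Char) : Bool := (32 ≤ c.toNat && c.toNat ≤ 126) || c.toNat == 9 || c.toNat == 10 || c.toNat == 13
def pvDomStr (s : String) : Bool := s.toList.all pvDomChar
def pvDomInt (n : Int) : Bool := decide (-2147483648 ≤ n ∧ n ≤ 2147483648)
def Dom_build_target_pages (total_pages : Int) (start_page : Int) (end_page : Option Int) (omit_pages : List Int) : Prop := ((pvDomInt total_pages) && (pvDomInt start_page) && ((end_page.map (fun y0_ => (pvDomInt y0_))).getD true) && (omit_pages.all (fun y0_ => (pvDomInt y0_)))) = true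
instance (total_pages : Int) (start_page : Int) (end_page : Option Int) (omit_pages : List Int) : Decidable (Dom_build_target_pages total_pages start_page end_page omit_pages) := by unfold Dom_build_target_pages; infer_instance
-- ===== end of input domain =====

-- B replaces the per-page membership filter by sorting the in-range omitted pages and
-- emitting the contiguous range segments between consecutive cuts (objective: alternative).

-- ===== PORT A =====
def build_target_pages (total_pages : Int) (start_page : Int) (end_page : Option Int) (omit_pages : List Int) : List Int :=
  let upper_bound := match end_page with
    | some e => min total_pages e
    | none => total_pages
  if upper_bound < start_page then []
  else (PySem.List.pyRange start_page (upper_bound + 1) 1).filter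
         (fun page => !(PySem.Set.contains omit_pages page))

-- ===== PORT B =====
def build_target_pages_alt (total_pages : Int) (start_page : Int) (end_page : Option Int) (omit_pages : List Int) : List Int :=
  let upper_bound := match end_page with
    | some e => min total_pages e
    | none => total_pages
  let cuts := PySem.List.sorted
    (omit_pages.filter (fun p => decide (start_page ≤ p) && decide (p ≤ upper_bound)))
    (fun x => x) false
  let st := cuts.foldl
    (fun (st : List Int × Int) cut => (st.1 ++ PySem.List.pyRange st.2 cut 1, cut + 1))
    (([] : List Int), start_page)
  st.1 ++ PySem.List.pyRange st.2 (upper_bound + 1) 1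

-- ===== PRECONDITION & SPEC =====
def Spec_build_target_pages (total_pages : Int) (start_page : Int) (end_page : Option Int) (omit_pages : List Int) (out : List Int) : Prop := out = build_target_pages_alt total_pages start_page end_page omit_pages
instance (total_pages : Int) (start_page : Int) (end_page : Option Int) (omit_pages : List Int) (out : List Int) : Decidable (Spec_build_target_pages total_pages start_page end_page omit_pages out) := by unfold Spec_build_target_pages; infer_instance

-- ===== CLAIM =====
def Claim_equal_build_target_pages : Prop := ∀ (total_pages : Int) (start_page : Int) (end_page : Option Int) (omit_pages : List Int), Dom_build_target_pages total_pages start_page end_page omit_pages → Spec_build_target_pages total_pages start_page end_page omit_pages (build_target_pages total_pages start_page end_page omit_pages)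

-- ===== LEMMAS AND PROOFS =====

-- The segment-building fold, run over any sorted list of cuts bounded by `upper`
-- (each cut ≤ upper and ≥ lo - 1), produces exactly the filtered range.
theorem segs_eq (cuts : List Int) (upper : Int) :
    ∀ (lo : Int) (acc : List Int),
      cuts.Pairwise (· ≤ ·) →
      (∀ c ∈ cuts, c ≤ upper ∧ lo ≤ c + 1) →
      (cuts.foldl (fun (st : List Int × Int) cut => (st.1 ++ PySem.List.pyRange st.2 cut 1, cut + 1)) (acc, lo)).1
        ++ PySem.List.pyRange (cuts.foldl (fun (st : List Int × Int) cut => (st.1 ++ PySem.List.pyRange st.2 cut 1, cut + 1)) (acc, lo)).2 (upper + 1) 1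
      = acc ++ (PySem.List.pyRange lo (upper + 1) 1).filter (fun p => !cuts.contains p) := by
  induction cuts with
  | nil =>
      intro lo acc _ _
      simp
  | cons c rest ih =>
      intro lo acc hp hb
      have hrest_p : rest.Pairwise (· ≤ ·) := hp.of_cons
      have hc_le : ∀ c' ∈ rest, c ≤ c' := fun c' hc' => (List.pairwise_cons.mp hp).1 c' hc'
      have hb' : ∀ c' ∈ rest, c' ≤ upper ∧ c + 1 ≤ c' + 1 := by
        intro c' hc'
        exact ⟨(hb c' (List.mem_cons_of_mem _ hc')).1, by have := hc_le c' hc'; omega⟩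
      have hcu : c ≤ upper := (hb c (List.mem_cons_self)).1
      have hlo : lo ≤ c + 1 := (hb c (List.mem_cons_self)).2
      have key : PySem.List.pyRange lo c 1
            ++ (PySem.List.pyRange (c + 1) (upper + 1) 1).filter (fun p => !rest.contains p)
          = (PySem.List.pyRange lo (upper + 1) 1).filter (fun p => !(c :: rest).contains p) := by
        have hcongr : ∀ p ∈ PySem.List.pyRange (c + 1) (upper + 1) 1,
            (!(c :: rest).contains p) = (!rest.contains p) := by
          intro p hpmem
          have hp' := (PySem.List.mem_pyRange_one.mp hpmem).1
          have hne : p ≠ c := by omega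
          simp [hne]
        by_cases hlc : lo ≤ c
        · -- split the range at c and at c+1
          have h1 : PySem.List.pyRange lo (upper + 1) 1
              = PySem.List.pyRange lo c 1 ++ PySem.List.pyRange c (upper + 1) 1 :=
            PySem.List.pyRange_one_append lo c (upper + 1) hlc (by omega)
          have h2 : PySem.List.pyRange c (upper + 1) 1
              = PySem.List.pyRange c (c + 1) 1 ++ PySem.List.pyRange (c + 1) (upper + 1) 1 :=
            PySem.List.pyRange_one_append c (c + 1) (upper + 1) (by omega) (by omega)
          have hself : (PySem.List.pyRange lo c 1).filter (fun p => !(c :: rest).contains p)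
              = PySem.List.pyRange lo c 1 := by
            apply List.filter_eq_self.mpr
            intro p hpmem
            have hp' := PySem.List.mem_pyRange_one.mp hpmem
            have hne : p ≠ c := by omega
            have hnr : p ∉ rest := by
              intro hmem
              have := hc_le p hmem
              omega
            simp [hne, hnr]
          rw [h1, h2, List.filter_append, List.filter_append, hself,
              PySem.List.pyRange_one_singleton, List.filter_congr hcongr]
          simp
        · -- lo = c + 1: the first segment is empty and c is below the range
          have hloc : lo = c + 1 := by omega
          subst hloc
          rw [PySem.List.pyRange_one_eq_nil (by omega), List.filter_congr hcongr]
          simp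
      rw [List.foldl_cons]
      rw [ih (c + 1) (acc ++ PySem.List.pyRange lo c 1) hrest_p hb']
      rw [List.append_assoc, key]

theorem build_target_pages_eq (total_pages : Int) (start_page : Int) (end_page : Option Int) (omit_pages : List Int) :
    build_target_pages total_pages start_page end_page omit_pages =
      build_target_pages_alt total_pages start_page end_page omit_pages := by
  unfold build_target_pages build_target_pages_alt
  set ub := (match end_page with | some e => min total_pages e | none => total_pages) with hub
  set cuts := PySem.List.sorted
    (omit_pages.filter (fun p => decide (start_page ≤ p) && decide (p ≤ ub)))
    (fun x => x) false with hcuts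
  have hmemcuts : ∀ c, c ∈ cuts ↔ (c ∈ omit_pages ∧ start_page ≤ c ∧ c ≤ ub) := by
    intro c
    rw [hcuts, PySem.List.mem_sorted, List.mem_filter]
    simp
  have hsorted : cuts.Pairwise (· ≤ ·) := PySem.List.sorted_pairwise _ _
  have hb : ∀ c ∈ cuts, c ≤ ub ∧ start_page ≤ c + 1 := by
    intro c hc
    have := (hmemcuts c).mp hc
    exact ⟨this.2.2, by omega⟩
  have hsegs := segs_eq cuts ub start_page ([] : List Int) hsorted hb
  simp only at hsegs
  rw [hsegs, List.nil_append]
  have hfc : ∀ p ∈ PySem.List.pyRange start_page (ub + 1) 1,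
      (!(PySem.Set.contains omit_pages p)) = (!cuts.contains p) := by
    intro p hpmem
    have hp' := PySem.List.mem_pyRange_one.mp hpmem
    have : p ∈ cuts ↔ p ∈ omit_pages := by
      rw [hmemcuts p]
      constructor
      · exact fun h => h.1
      · exact fun h => ⟨h, by omega, by omega⟩
    simp [PySem.Set.contains, this]
  by_cases h : ub < start_page
  · rw [if_pos h, PySem.List.pyRange_one_eq_nil (by omega)]
    simp
  · rw [if_neg h, List.filter_congr hfc]

-- ===== VERDICT =====
theorem build_target_pages_spec : Claim_equal_build_target_pages := by
  intro tp sp ep om _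
  exact build_target_pages_eq tp sp ep om
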